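-- pv_equiv track=rewrite | github.com/RevolverWN/personal-agent | backend/app/memory/extractor.py | _format_conversation
-- ===== SOURCE A (Python) =====
-- from typing import List, Optional
--
-- def _format_conversation(messages: List[dict]) -> str:
--     """Format conversation for extraction."""
--     formatted = []
--     for msg in messages:
--         role = msg.get("role", "unknown")
--         content = msg.get("content", "")
--
--         if role == "user":
--             formatted.append(f"User: {content}")
--         elif role == "assistant":
--             formatted.append(f"Assistant: {content}")
--
--     return "\n\n".join(formatted[-10:])  # Last 10 messages
-- ===== SOURCE B (Python) =====
-- def _format_conversation(messages):
--     """Format conversation for extraction (reverse scan with early stop)."""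
--     buf = []
--     for msg in reversed(messages):
--         role = msg.get("role", "unknown")
--         content = msg.get("content", "")
--         if role == "user":
--             buf.append(f"User: {content}")
--         elif role == "assistant":
--             buf.append(f"Assistant: {content}")
--         if len(buf) == 10:
--             break
--     return "\n\n".join(reversed(buf))
-- ===== Notes on version B (the rewrite author's own statement) =====
-- stated objective: alternative
-- what changed: B scans the messages in reverse with a bounded buffer and stops as soon as 10 formatted entries are collected, then reverses the buffer, instead of formatting every message and slicing [-10:].
import Mathlib
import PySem

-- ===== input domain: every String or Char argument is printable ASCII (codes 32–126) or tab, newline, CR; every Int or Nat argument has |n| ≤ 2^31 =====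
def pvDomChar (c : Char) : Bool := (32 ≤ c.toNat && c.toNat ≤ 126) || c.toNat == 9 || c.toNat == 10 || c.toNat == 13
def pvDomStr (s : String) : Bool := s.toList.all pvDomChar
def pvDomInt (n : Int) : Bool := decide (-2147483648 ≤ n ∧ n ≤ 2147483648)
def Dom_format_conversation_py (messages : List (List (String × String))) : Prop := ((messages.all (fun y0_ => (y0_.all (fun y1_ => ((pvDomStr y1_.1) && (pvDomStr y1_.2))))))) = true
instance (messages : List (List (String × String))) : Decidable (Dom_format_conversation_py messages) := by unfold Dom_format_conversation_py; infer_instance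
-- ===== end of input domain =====

-- ===== PORT A =====
-- B reverses the scan and stops once 10 entries are buffered, instead of formatting all messages and slicing the last 10 (objective: alternative decomposition).

-- role/content lookup shared by neither port's structure: each port inlines its own lets (this is msg.get(k, d))
def format_conversation_py (messages : List (List (String × String))) : String :=
  let formatted := messages.foldl (fun formatted msg =>
    let role := PySem.Dict.getD (PySem.Dict.mk msg) "role" "unknown"
    let content := PySem.Dict.getD (PySem.Dict.mk msg) "content" ""
    if role == "user" then formatted ++ ["User: " ++ content]
    else if role == "assistant" then formatted ++ ["Assistant: " ++ content]
    else formatted) []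
  PySem.Str.join "\n\n" (PySem.List.slice formatted (some (-10)) none)

-- ===== PORT B =====
def pvAltLoop : List (List (String × String)) → List String → List String
  | [], buf => buf
  | msg :: rest, buf =>
    let role := PySem.Dict.getD (PySem.Dict.mk msg) "role" "unknown"
    let content := PySem.Dict.getD (PySem.Dict.mk msg) "content" ""
    let buf' := if role == "user" then buf ++ ["User: " ++ content]
      else if role == "assistant" then buf ++ ["Assistant: " ++ content]
      else buf
    if buf'.length == 10 then buf' else pvAltLoop rest buf'

def format_conversation_py_alt (messages : List (List (String × String))) : String :=
  PySem.Str.join "\n\n" (pvAltLoop messages.reverse []).reverse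

-- ===== PRECONDITION & SPEC =====
def Spec_format_conversation_py (messages : List (List (String × String))) (out : String) : Prop := out = format_conversation_py_alt messages
instance (messages : List (List (String × String))) (out : String) : Decidable (Spec_format_conversation_py messages out) := by unfold Spec_format_conversation_py; infer_instance

-- ===== CLAIM (what is proved, stated in full; the proofs are below) =====
def Claim_equal_format_conversation_py : Prop := ∀ (messages : List (List (String × String))), Dom_format_conversation_py messages → Spec_format_conversation_py messages (format_conversation_py messages)

-- ===== LEMMAS AND PROOFS =====

/-- The per-message formatted entry, as a 0- or 1-element list. -/
def pvFmt (msg : List (String × String)) : List String :=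
  let role := PySem.Dict.getD (PySem.Dict.mk msg) "role" "unknown"
  let content := PySem.Dict.getD (PySem.Dict.mk msg) "content" ""
  if role == "user" then ["User: " ++ content]
  else if role == "assistant" then ["Assistant: " ++ content]
  else []

lemma pvFmt_cases (msg : List (String × String)) : pvFmt msg = [] ∨ ∃ s, pvFmt msg = [s] := by
  unfold pvFmt; dsimp only; split_ifs <;> simp

lemma pvBody_eq (acc : List String) (msg : List (String × String)) :
    (let role := PySem.Dict.getD (PySem.Dict.mk msg) "role" "unknown"
     let content := PySem.Dict.getD (PySem.Dict.mk msg) "content" ""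
     if role == "user" then acc ++ ["User: " ++ content]
     else if role == "assistant" then acc ++ ["Assistant: " ++ content]
     else acc) = acc ++ pvFmt msg := by
  unfold pvFmt; dsimp only; split_ifs <;> simp

lemma a_formatted_eq (messages : List (List (String × String))) (acc : List String) :
    messages.foldl (fun formatted msg =>
      let role := PySem.Dict.getD (PySem.Dict.mk msg) "role" "unknown"
      let content := PySem.Dict.getD (PySem.Dict.mk msg) "content" ""
      if role == "user" then formatted ++ ["User: " ++ content]
      else if role == "assistant" then formatted ++ ["Assistant: " ++ content]
      else formatted) acc = acc ++ messages.flatMap pvFmt := by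
  induction messages generalizing acc with
  | nil => simp
  | cons msg rest ih =>
    rw [List.foldl_cons]
    dsimp only
    rw [pvBody_eq acc msg, ih (acc ++ pvFmt msg), List.flatMap_cons, List.append_assoc]

lemma altLoop_eq (r : List (List (String × String))) (buf : List String) (h : buf.length < 10) :
    pvAltLoop r buf = buf ++ (r.flatMap pvFmt).take (10 - buf.length) := by
  induction r generalizing buf with
  | nil => simp [pvAltLoop]
  | cons msg rest ih =>
    rw [pvAltLoop]
    rw [pvBody_eq buf msg, List.flatMap_cons]
    rcases pvFmt_cases msg with h0 | ⟨s, hs⟩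
    · have hb : ((buf ++ pvFmt msg).length == 10) = false := by
        rw [h0]; simp; omega
      rw [hb, if_neg (by simp), ih (buf ++ pvFmt msg) (by rw [h0]; simpa using h)]
      rw [h0]
      simp
    · by_cases h9 : buf.length = 9
      · have hb : ((buf ++ pvFmt msg).length == 10) = true := by rw [hs]; simp [h9]
        rw [hb, if_pos rfl, hs]
        have h1 : 10 - buf.length = 1 := by omega
        rw [h1]
        simp
      · have hb : ((buf ++ pvFmt msg).length == 10) = false := by rw [hs]; simp; omega
        rw [hb, if_neg (by simp), ih (buf ++ pvFmt msg) (by rw [hs]; simp; omega), hs]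
        have h1 : 10 - buf.length = (10 - (buf ++ [s]).length) + 1 := by simp; omega
        rw [h1]
        simp

lemma flatMap_reverse_pvFmt (messages : List (List (String × String))) :
    messages.reverse.flatMap pvFmt = (messages.flatMap pvFmt).reverse := by
  induction messages with
  | nil => simp
  | cons msg rest ih =>
    rw [List.reverse_cons, List.flatMap_append, ih, List.flatMap_cons]
    rcases pvFmt_cases msg with h0 | ⟨s, hs⟩
    · simp [h0]
    · simp [hs]

-- ===== VERDICT (by name: the statement is the Claim_ definition above) =====
theorem format_conversation_py_spec : Claim_equal_format_conversation_py := by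
  intro messages _
  unfold Spec_format_conversation_py format_conversation_py format_conversation_py_alt
  dsimp only
  rw [a_formatted_eq messages [], altLoop_eq messages.reverse [] (by simp)]
  simp only [List.length_nil, Nat.sub_zero, List.nil_append]
  rw [flatMap_reverse_pvFmt]
  rw [PySem.List.slice_from_neg_ofNat _ 10 (by omega)]
  congr 1
  rw [List.take_reverse, List.reverse_reverse]
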